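-- pv_equiv track=rewrite | github.com/dillu9878/Codechef-Solutions | Nov'19_challenge/hardSequence.py | positionCounter
-- ===== SOURCE A (Python) =====
-- def positionCounter(arr):
--     res, count = [], {}
--     for i in arr:
--         if i in count:
--             v = count[i] + 1
--             count[i] = v
--         else:
--             v = 1
--             count[i] = 1
--         res.append(v)
--     return res
-- ===== SOURCE B (Python) =====
-- def positionCounter(arr):
--     return [arr[:i + 1].count(arr[i]) for i in range(len(arr))]
-- ===== Notes on version B (the rewrite author's own statement) =====
-- stated objective: simpler
-- what changed: B replaces A's single-pass loop that maintains a dictionary of running counts with a one-line prefix-count comprehension: res[i] = arr[:i+1].count(arr[i]), no table maintained.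
import Mathlib
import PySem

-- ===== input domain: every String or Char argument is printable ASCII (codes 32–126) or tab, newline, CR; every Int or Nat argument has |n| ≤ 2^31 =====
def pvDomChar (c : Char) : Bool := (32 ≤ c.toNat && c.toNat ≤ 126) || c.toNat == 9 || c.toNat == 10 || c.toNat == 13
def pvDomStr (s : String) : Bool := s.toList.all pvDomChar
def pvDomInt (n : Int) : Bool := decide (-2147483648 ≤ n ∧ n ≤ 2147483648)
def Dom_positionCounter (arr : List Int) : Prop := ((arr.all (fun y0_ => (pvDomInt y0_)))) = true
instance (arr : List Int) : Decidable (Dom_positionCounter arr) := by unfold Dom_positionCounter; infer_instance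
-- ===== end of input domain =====

-- B replaces A's single-pass dictionary of running counts with a prefix-count comprehension
-- (res[i] = arr[:i+1].count(arr[i])): simpler to read, same result; not faster (O(n^2) vs O(n)).

-- ===== PORT A =====
def positionCounter (arr : List Int) : List Int :=
  (arr.foldl
    (fun (st : List Int × PySem.Dict Int Int) i =>
      if st.2.contains i then
        let v := st.2.getD i 0 + 1   -- count[i] + 1: key is present (guarded), so getD reads count[i]
        (st.1 ++ [v], st.2.insert i v)
      else
        (st.1 ++ [(1 : Int)], st.2.insert i 1))
    ([], PySem.Dict.empty)).1

-- ===== PORT B =====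
def positionCounter_alt (arr : List Int) : List Int :=
  (PySem.List.pyRange 0 (arr.length : Int) 1).map
    (fun i => ((PySem.List.slice arr none (some (i + 1))).count (PySem.List.pyGetD arr i 0) : Int))

-- ===== PRECONDITION & SPEC =====
def Spec_positionCounter (arr : List Int) (out : List Int) : Prop := out = positionCounter_alt arr
instance (arr : List Int) (out : List Int) : Decidable (Spec_positionCounter arr out) := by unfold Spec_positionCounter; infer_instance

-- ===== CLAIM (what is proved, stated in full; the proofs are below) =====
def Claim_equal_positionCounter : Prop := ∀ (arr : List Int), Dom_positionCounter arr → Spec_positionCounter arr (positionCounter arr)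

-- ===== LEMMAS AND PROOFS =====

-- running-count list of l, continuing after the already-seen prefix `pref`
def pcGo (pref : List Int) : List Int → List Int
  | [] => []
  | x :: xs => ((pref.count x : Int) + 1) :: pcGo (pref ++ [x]) xs

lemma pcA_aux (l : List Int) : ∀ (res pref : List Int),
    (l.foldl
      (fun (st : List Int × PySem.Dict Int Int) i =>
        if st.2.contains i then
          let v := st.2.getD i 0 + 1
          (st.1 ++ [v], st.2.insert i v)
        else
          (st.1 ++ [(1 : Int)], st.2.insert i 1))
      (res, PySem.Dict.counter pref)).1 = res ++ pcGo pref l := by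
  induction l with
  | nil => intro res pref; simp [pcGo]
  | cons x xs ih =>
    intro res pref
    have hmod : (PySem.Dict.counter pref).modify x 0 (· + 1)
        = (PySem.Dict.counter pref).insert x ((PySem.Dict.counter pref).getD x 0 + 1) := rfl
    by_cases hx : x ∈ pref
    · have hc : (PySem.Dict.counter pref).contains x = true := by
        simpa [hx] using PySem.Dict.contains_counter pref x
      have hd : (PySem.Dict.counter pref).insert x ((PySem.Dict.counter pref).getD x 0 + 1)
          = PySem.Dict.counter (pref ++ [x]) := by
        rw [PySem.Dict.counter_append_singleton, hmod]
      simp only [List.foldl_cons]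
      rw [if_pos hc, hd, ih (res ++ [(PySem.Dict.counter pref).getD x 0 + 1]) (pref ++ [x])]
      simp [pcGo, PySem.Dict.getD_counter]
    · have hc : ¬ (PySem.Dict.counter pref).contains x = true := by
        simp [PySem.Dict.contains_counter, hx]
      have hcnt : pref.count x = 0 := List.count_eq_zero.mpr hx
      have hg : (PySem.Dict.counter pref).getD x 0 = 0 := by
        rw [PySem.Dict.getD_counter, hcnt]; rfl
      have hd : (PySem.Dict.counter pref).insert x 1 = PySem.Dict.counter (pref ++ [x]) := by
        rw [PySem.Dict.counter_append_singleton, hmod, hg]; norm_num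
      simp only [List.foldl_cons]
      rw [if_neg hc, hd, ih (res ++ [(1 : Int)]) (pref ++ [x])]
      simp [pcGo, hcnt]

lemma pcA (arr : List Int) : positionCounter arr = pcGo [] arr := by
  have h := pcA_aux arr [] []
  simpa [positionCounter, PySem.Dict.counter] using h

lemma pcGo_eq_map (l : List Int) : ∀ (pref : List Int),
    pcGo pref l = (List.range l.length).map
      (fun j => (((pref ++ l).take (pref.length + j + 1)).count ((pref ++ l).getD (pref.length + j) 0) : Int)) := by
  induction l with
  | nil => intro pref; simp [pcGo]
  | cons x xs ih =>
    intro pref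
    rw [List.length_cons, List.range_succ_eq_map]
    simp only [List.map_cons, List.map_map]
    show ((pref.count x : Int) + 1) :: pcGo (pref ++ [x]) xs = _
    congr 1
    · -- head
      have ht : (pref ++ x :: xs).take (pref.length + 0 + 1) = pref ++ [x] := by
        simp [List.take_append]
      have hg : (pref ++ x :: xs).getD (pref.length + 0) 0 = x := by
        simp [List.getD]
      rw [ht, hg]
      simp [List.count_append]
    · -- tail
      rw [ih (pref ++ [x])]
      apply List.map_congr_left
      intro j _
      simp only [Function.comp]
      have h1 : pref ++ x :: xs = (pref ++ [x]) ++ xs := by simp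
      have h2 : (pref ++ [x]).length + j = pref.length + (j + 1) := by simp; omega
      rw [h2, h1]

lemma pcB (arr : List Int) : positionCounter_alt arr = pcGo [] arr := by
  rw [positionCounter_alt, pcGo_eq_map arr []]
  rw [PySem.List.pyRange_one]
  simp only [Int.sub_zero, Int.toNat_natCast, List.map_map]
  apply List.map_congr_left
  intro k _
  simp only [Function.comp, Int.zero_add]
  have h1 : ((k : Int) + 1) = ((k + 1 : Nat) : Int) := by push_cast; ring
  rw [h1, PySem.List.slice_to_natCast, PySem.List.pyGetD_natCast]
  simp

-- ===== VERDICT (by name: the statement is the Claim_ definition above) =====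
theorem positionCounter_spec : Claim_equal_positionCounter := by
  intro arr _
  show positionCounter arr = positionCounter_alt arr
  rw [pcA, pcB]
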